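-- pv_equiv track=rewrite | github.com/zahias/advising | degree_plan_view.py | _group_semesters_by_year
-- ===== SOURCE A (Python) =====
-- def _group_semesters_by_year(semesters):
--     """Group semester keys by year for organized display.
--
--     Args:
--         semesters: Dict with keys like 'Fall-1', 'Spring-2', etc.
--
--     Returns:
--         Dict mapping year names to list of semester keys
--     """
--     year_groups = {}
--
--     for semester_key in semesters.keys():
--         if '-' in semester_key:
--             parts = semester_key.split('-')
--             if len(parts) == 2:
--                 year_num = parts[1].strip()
--                 year_name = f"Year {year_num}"
--
--                 if year_name not in year_groups:
--                     year_groups[year_name] = []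
--
--                 year_groups[year_name].append(semester_key)
--
--     # Sort semesters within each year (Fall, Spring, Summer)
--     semester_order = {'fall': 0, 'spring': 1, 'summer': 2}
--     for year_name in year_groups:
--         year_groups[year_name].sort(
--             key=lambda x: semester_order.get(x.split('-')[0].lower(), 99)
--         )
--
--     return year_groups
-- ===== SOURCE B (Python) =====
-- def _group_semesters_by_year(semesters):
--     """Same grouping, by a different decomposition: filter the keys once,
--     stable-sort ALL valid keys by season rank globally, then fill buckets
--     (created empty in first-appearance order) in a single grouping pass,
--     so no per-year sort is needed."""
--     order = {'fall': 0, 'spring': 1, 'summer': 2}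
--
--     def rank(k):
--         return order.get(k.split('-')[0].lower(), 99)
--
--     def year_name(k):
--         return "Year " + k.split('-')[1].strip()
--
--     valid = [k for k in semesters.keys() if '-' in k and len(k.split('-')) == 2]
--     groups = {year_name(k): [] for k in valid}
--     for k in sorted(valid, key=rank):
--         groups[year_name(k)].append(k)
--     return groups
-- ===== Notes on version B (the rewrite author's own statement) =====
-- stated objective: alternative
-- what changed: Instead of grouping keys first and then sorting each year's bucket separately, B filters/parses the keys once, does ONE global stable sort of all valid keys by season rank, and fills the buckets (pre-created in first-appearance order) in a single grouping pass, so no per-year sort is needed.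
import Mathlib
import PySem

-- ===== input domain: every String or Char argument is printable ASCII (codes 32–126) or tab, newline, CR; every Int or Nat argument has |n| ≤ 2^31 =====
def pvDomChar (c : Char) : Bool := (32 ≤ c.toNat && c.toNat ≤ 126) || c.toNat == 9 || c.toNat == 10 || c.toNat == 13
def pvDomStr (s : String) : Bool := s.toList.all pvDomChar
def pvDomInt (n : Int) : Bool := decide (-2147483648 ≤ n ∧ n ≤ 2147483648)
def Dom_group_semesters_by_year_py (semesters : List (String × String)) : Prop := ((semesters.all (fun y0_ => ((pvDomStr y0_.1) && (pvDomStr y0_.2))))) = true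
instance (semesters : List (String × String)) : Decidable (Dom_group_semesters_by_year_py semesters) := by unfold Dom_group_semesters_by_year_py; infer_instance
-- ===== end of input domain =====

-- B groups the keys by ONE global stable sort by season rank followed by a single bucket-filling
-- pass (buckets pre-created in first-appearance order), instead of A's per-year sorts: alternative
-- decomposition, same results.

-- helpers shared by both ports: both Pythons compute these exact expressions
-- (split('-') is never empty, so split('-')[0] is the head; parts[1] is only
--  evaluated under the length == 2 guard, so getD 1 "" is exact there)
def seasonRank (x : String) : Int :=
  PySem.Dict.getD (PySem.Dict.ofList [("fall", 0), ("spring", 1), ("summer", 2)])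
    (PySem.Str.lower (((PySem.Str.split? x "-").getD []).headD "")) 99

def yearName (k : String) : String :=
  "Year " ++ PySem.Str.strip (((PySem.Str.split? k "-").getD []).getD 1 "")

-- ===== PORT A =====
-- the second Python loop sorts each value in place and touches no key,
-- ported as a map over the items
def group_semesters_by_year_py (semesters : List (String × String)) : List (String × List String) :=
  let year_groups : PySem.Dict String (List String) :=
    semesters.foldl (fun yg kv =>
      if PySem.Str.isIn "-" kv.1 then
        let parts := (PySem.Str.split? kv.1 "-").getD []
        if parts.length == 2 then
          let yn := "Year " ++ PySem.Str.strip (parts.getD 1 "")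
          let yg' := if yg.contains yn then yg else yg.insert yn ([] : List String)
          yg'.insert yn (yg'.getD yn [] ++ [kv.1])
        else yg
      else yg) PySem.Dict.empty
  (year_groups.items.map (fun p => (p.1, PySem.List.sorted p.2 seasonRank)))

-- ===== PORT B =====
def group_semesters_by_year_py_alt (semesters : List (String × String)) : List (String × List String) :=
  let valid := (semesters.map (fun kv => kv.1)).filter
      (fun k => PySem.Str.isIn "-" k && ((PySem.Str.split? k "-").getD []).length == 2)
  let groups : PySem.Dict String (List String) :=
    valid.foldl (fun d k => d.insert (yearName k) []) PySem.Dict.empty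
  let filled := (PySem.List.sorted valid seasonRank).foldl
      (fun d k => d.modify (yearName k) [] (fun v => v ++ [k])) groups
  filled.items

-- ===== PRECONDITION & SPEC =====
def Spec_group_semesters_by_year_py (semesters : List (String × String)) (out : List (String × List String)) : Prop := out = group_semesters_by_year_py_alt semesters
instance (semesters : List (String × String)) (out : List (String × List String)) : Decidable (Spec_group_semesters_by_year_py semesters out) := by unfold Spec_group_semesters_by_year_py; infer_instance

-- ===== CLAIM (what is proved, stated in full; the proofs are below) =====
def Claim_equal_group_semesters_by_year_py : Prop := ∀ (semesters : List (String × String)), Dom_group_semesters_by_year_py semesters → Spec_group_semesters_by_year_py semesters (group_semesters_by_year_py semesters)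

-- ===== LEMMAS AND PROOFS =====

-- proof-side names for the pieces both ports are made of
def pvValid (k : String) : Bool :=
  PySem.Str.isIn "-" k && ((PySem.Str.split? k "-").getD []).length == 2

def pvKs (semesters : List (String × String)) : List String :=
  (semesters.map (fun kv => kv.1)).filter pvValid

def pvMStep (d : PySem.Dict String (List String)) (k : String) : PySem.Dict String (List String) :=
  d.modify (yearName k) [] (fun v => v ++ [k])

-- inserting twice at the same key is inserting once
lemma insert_insert_self {κ ν : Type} [BEq κ] [LawfulBEq κ] (d : PySem.Dict κ ν) (k : κ) (v w : ν) :
    (d.insert k v).insert k w = d.insert k w := by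
  apply PySem.Dict.ext
  cases hc : d.contains k with
  | true =>
    rw [PySem.Dict.items_insert_of_contains _ _ (PySem.Dict.contains_insert_self d k v),
        PySem.Dict.items_insert_of_contains _ _ hc, PySem.Dict.items_insert_of_contains _ _ hc,
        List.map_map]
    apply List.map_congr_left
    intro p _
    by_cases h : (p.1 == k) = true <;> simp [Function.comp, h]
  | false =>
    rw [PySem.Dict.items_insert_of_contains _ _ (PySem.Dict.contains_insert_self d k v),
        PySem.Dict.items_insert_of_not_contains _ _ hc,
        PySem.Dict.items_insert_of_not_contains _ _ hc, List.map_append]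
    have hnk : ∀ p ∈ d.items, (p.1 == k) = false := by
      intro p hp
      have : p.1 ∈ d.keys := List.mem_map_of_mem hp
      by_contra hb
      have : k ∈ d.keys := by
        have := (eq_of_beq (by simpa using hb) : p.1 = k)
        simpa [this] using ‹p.1 ∈ d.keys›
      rw [← PySem.Dict.contains_iff_mem_keys] at this
      simp [hc] at this
    have hmap : d.items.map (fun p => if (p.1 == k) = true then (k, w) else p) = d.items := by
      conv_rhs => rw [← List.map_id d.items]
      apply List.map_congr_left
      intro p hp
      simp [hnk p hp]
    simp [hmap]

-- the create-if-absent-then-append step is a single overwrite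
lemma insert_step (yg : PySem.Dict String (List String)) (yn : String) (k : String) :
    (if yg.contains yn = true then yg else yg.insert yn []).insert yn
      ((if yg.contains yn = true then yg else yg.insert yn []).getD yn [] ++ [k])
    = yg.insert yn (yg.getD yn [] ++ [k]) := by
  by_cases hc : yg.contains yn = true
  · rw [if_pos hc]
  · rw [if_neg hc, PySem.Dict.getD_insert_self, insert_insert_self,
        PySem.Dict.getD_of_not_contains _ _ (by simpa using hc)]

-- A's body of the first loop, written as a single Dict.modify
lemma stepA_eq_mstep :
    (fun (yg : PySem.Dict String (List String)) (kv : String × String) =>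
      if PySem.Str.isIn "-" kv.1 then
        let parts := (PySem.Str.split? kv.1 "-").getD []
        if parts.length == 2 then
          let yn := "Year " ++ PySem.Str.strip (parts.getD 1 "")
          let yg' := if yg.contains yn then yg else yg.insert yn ([] : List String)
          yg'.insert yn (yg'.getD yn [] ++ [kv.1])
        else yg
      else yg)
    = (fun yg kv => if pvValid kv.1 then pvMStep yg kv.1 else yg) := by
  funext yg kv
  by_cases h1 : PySem.Str.isIn "-" kv.1 = true
  · by_cases h2 : (((PySem.Str.split? kv.1 "-").getD []).length == 2) = true
    · simp only [h1, h2, if_true, pvValid, pvMStep, PySem.Dict.modify, Bool.and_self]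
      exact insert_step yg _ kv.1
    · have h2' : (((PySem.Str.split? kv.1 "-").getD []).length == 2) = false := by
        simpa using h2
      simp only [h1, h2', if_true, Bool.false_eq_true, if_false, pvValid, Bool.and_false]
  · have h1' : PySem.Str.isIn "-" kv.1 = false := by simpa using h1
    simp only [h1', pvValid, Bool.false_eq_true, if_false, Bool.false_and]

-- value of the grouping fold at any key
lemma getD_mstep_foldl (l : List String) (d : PySem.Dict String (List String)) (c : String) :
    (l.foldl pvMStep d).getD c [] = d.getD c [] ++ l.filter (fun k => yearName k == c) := by
  have h : l.foldl pvMStep d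
      = (l.map (fun k => (yearName k, k))).foldl
          (fun d p => d.modify p.1 [] (fun v => v ++ [p.2])) d := by
    rw [List.foldl_map]
    rfl
  rw [h, PySem.Dict.getD_foldl_modify_append, List.filter_map, List.map_map]
  simp [Function.comp_def]

-- keys of the grouping fold
lemma keys_mstep_foldl (l : List String) (d : PySem.Dict String (List String)) :
    (l.foldl pvMStep d).keys = PySem.Set.update d.keys (l.map yearName) := by
  exact PySem.Dict.keys_foldl_modify_key l yearName [] (fun _ k => (fun v => v ++ [k])) d

-- all values inserted by B's first pass are []
lemma getD_insert_nil_foldl (l : List String) :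
    ∀ (d : PySem.Dict String (List String)), (∀ c, d.getD c [] = []) →
      ∀ c, (l.foldl (fun d k => d.insert (yearName k) []) d).getD c [] = [] := by
  induction l with
  | nil => intro d hd c; exact hd c
  | cons k t ih =>
    intro d hd c
    refine ih _ ?_ c
    intro c'
    by_cases h : c' = yearName k
    · subst h; rw [PySem.Dict.getD_insert_self]
    · rw [PySem.Dict.getD_insert_of_ne _ _ _ h]; exact hd c'

-- Set.update adds nothing when every element is already present
lemma set_update_of_subset {α : Type} [BEq α] [LawfulBEq α] (s : PySem.Set α) (xs : List α)
    (h : ∀ x ∈ xs, x ∈ s) : PySem.Set.update s xs = s := by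
  rw [PySem.Set.update_eq_append_filter]
  have : (PySem.Set.ofList xs).filter (fun y => !s.contains y) = [] := by
    rw [List.filter_eq_nil_iff]
    intro y hy
    have hs : y ∈ s := h y ((PySem.Set.mem_ofList xs y).mp hy)
    simpa using hs
  rw [this, List.append_nil]

-- items of a dict with distinct keys, read off its key list
lemma items_eq_keys_map_aux {κ ν : Type} [BEq κ] [LawfulBEq κ] (v0 : ν) :
    ∀ l : List (κ × ν), (l.map Prod.fst).Nodup →
      l = (l.map Prod.fst).map (fun c => (c, (PySem.Dict.mk l).getD c v0)) := by
  intro l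
  induction l with
  | nil => intro _; rfl
  | cons p t ih =>
    intro hnd
    obtain ⟨k, v⟩ := p
    simp only [List.map_cons, List.nodup_cons] at hnd
    obtain ⟨hk, ht⟩ := hnd
    simp only [List.map_cons]
    have hhead : (PySem.Dict.mk ((k, v) :: t)).getD k v0 = v := by
      simp [PySem.Dict.getD, PySem.Dict.get?_mk_cons]
    have htail : ∀ c ∈ t.map Prod.fst,
        (PySem.Dict.mk ((k, v) :: t)).getD c v0 = (PySem.Dict.mk t).getD c v0 := by
      intro c hc
      have hne : k ≠ c := by
        intro he; exact hk (he ▸ hc)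
      simp [PySem.Dict.getD, PySem.Dict.get?_mk_cons, hne]
    have hmap : (t.map Prod.fst).map (fun c => (c, (PySem.Dict.mk ((k, v) :: t)).getD c v0))
        = (t.map Prod.fst).map (fun c => (c, (PySem.Dict.mk t).getD c v0)) := by
      apply List.map_congr_left
      intro c hc
      rw [htail c hc]
    rw [hhead, hmap, ← ih ht]

lemma items_eq_keys_map {κ ν : Type} [BEq κ] [LawfulBEq κ] (d : PySem.Dict κ ν) (v0 : ν)
    (h : d.keys.Nodup) : d.items = d.keys.map (fun c => (c, d.getD c v0)) := by
  obtain ⟨l⟩ := d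
  exact items_eq_keys_map_aux v0 l h

-- insertBy goes to the front when it precedes everything
lemma insertBy_all_lt {α : Type} (bef : α → α → Bool) (x : α) (l : List α)
    (h : ∀ z ∈ l, bef x z = true) :
    PySem.List.insertBy bef x l = x :: l := by
  cases l with
  | nil => simp [PySem.List.insertBy]
  | cons y t => simp [PySem.List.insertBy, h y (by simp)]

-- filtering commutes with inserting into a key-sorted list
lemma filter_insertBy {α : Type} (rank : α → Int) (q : α → Bool) (x : α) :
    ∀ ys : List α, ys.Pairwise (fun a b => rank a ≤ rank b) →
      (PySem.List.insertBy (fun a b => decide (rank a < rank b)) x ys).filter q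
        = if q x then PySem.List.insertBy (fun a b => decide (rank a < rank b)) x (ys.filter q)
          else ys.filter q := by
  intro ys
  induction ys with
  | nil =>
    intro _
    by_cases hq : q x = true <;> simp [PySem.List.insertBy, hq]
  | cons y t ih =>
    intro hp
    rw [List.pairwise_cons] at hp
    obtain ⟨hy, ht⟩ := hp
    by_cases hlt : rank x < rank y
    · have hins : PySem.List.insertBy (fun a b => decide (rank a < rank b)) x (y :: t)
          = x :: y :: t := by simp [PySem.List.insertBy, hlt]
      rw [hins]
      by_cases hq : q x = true
      · rw [List.filter_cons, if_pos hq, if_pos hq, insertBy_all_lt]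
        intro z hz
        rcases List.mem_cons.mp (List.mem_of_mem_filter hz) with h | h
        · subst h; simp [hlt]
        · simpa using lt_of_lt_of_le hlt (hy z h)
      · rw [List.filter_cons, if_neg (by simp [hq]), if_neg (by simp [hq])]
    · have hins : PySem.List.insertBy (fun a b => decide (rank a < rank b)) x (y :: t)
          = y :: PySem.List.insertBy (fun a b => decide (rank a < rank b)) x t := by
        simp [PySem.List.insertBy, hlt]
      rw [hins]
      by_cases hqy : q y = true
      · simp only [List.filter_cons, hqy, if_pos]
        rw [ih ht]
        by_cases hqx : q x = true
        · simp only [hqx, if_pos]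
          simp [PySem.List.insertBy, hlt]
        · simp [hqx]
      · simp only [List.filter_cons, hqy]
        rw [ih ht]
        simp

-- filtering commutes with the stable sort
lemma filter_sorted {α : Type} (rank : α → Int) (q : α → Bool) (xs : List α) :
    (PySem.List.sorted xs rank).filter q = PySem.List.sorted (xs.filter q) rank := by
  induction xs using List.reverseRecOn with
  | nil => simp [PySem.List.sorted_eq_foldl_insertBy]
  | append_singleton xs x ih =>
    rw [PySem.List.sorted_eq_foldl_insertBy (xs ++ [x]), List.foldl_append]
    simp only [List.foldl_cons, List.foldl_nil]
    rw [← PySem.List.sorted_eq_foldl_insertBy xs,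
        filter_insertBy rank q x _ (PySem.List.sorted_pairwise xs rank), ih, List.filter_append]
    by_cases hq : q x = true
    · simp only [hq, if_pos, List.filter_cons, List.filter_nil]
      rw [PySem.List.sorted_eq_foldl_insertBy (xs.filter q ++ [x]), List.foldl_append]
      simp only [List.foldl_cons, List.foldl_nil]
      rw [← PySem.List.sorted_eq_foldl_insertBy (xs.filter q)]
    · simp [hq]

lemma set_update_nil {α : Type} [BEq α] (l : List α) :
    PySem.Set.update [] l = PySem.Set.ofList l := by
  rw [PySem.Set.ofList_eq_foldl]
  rfl

-- ===== VERDICT (by name: the statement is the Claim_ definition above) =====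
theorem group_semesters_by_year_py_spec : Claim_equal_group_semesters_by_year_py := by
  intro semesters _
  unfold Spec_group_semesters_by_year_py
  -- names
  set ks := pvKs semesters with hks
  -- A's first loop is the modify-fold over the valid keys
  have hA1 : semesters.foldl (fun yg kv =>
      if PySem.Str.isIn "-" kv.1 then
        let parts := (PySem.Str.split? kv.1 "-").getD []
        if parts.length == 2 then
          let yn := "Year " ++ PySem.Str.strip (parts.getD 1 "")
          let yg' := if yg.contains yn then yg else yg.insert yn ([] : List String)
          yg'.insert yn (yg'.getD yn [] ++ [kv.1])
        else yg
      else yg) PySem.Dict.empty = ks.foldl pvMStep PySem.Dict.empty := by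
    rw [stepA_eq_mstep, hks, pvKs, List.foldl_filter, List.foldl_map]
  have hA : group_semesters_by_year_py semesters =
      ((semesters.foldl (fun yg kv =>
        if PySem.Str.isIn "-" kv.1 then
          let parts := (PySem.Str.split? kv.1 "-").getD []
          if parts.length == 2 then
            let yn := "Year " ++ PySem.Str.strip (parts.getD 1 "")
            let yg' := if yg.contains yn then yg else yg.insert yn ([] : List String)
            yg'.insert yn (yg'.getD yn [] ++ [kv.1])
          else yg
        else yg) PySem.Dict.empty).items.map
          (fun p => (p.1, PySem.List.sorted p.2 seasonRank))) := rfl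
  have hB : group_semesters_by_year_py_alt semesters =
      ((PySem.List.sorted ks seasonRank).foldl pvMStep
        (ks.foldl (fun d k => d.insert (yearName k) []) PySem.Dict.empty)).items := rfl
  rw [hA, hB, hA1]
  set phase1 := ks.foldl pvMStep PySem.Dict.empty with hphase1
  set groups := ks.foldl (fun d k => d.insert (yearName k) []) PySem.Dict.empty with hgroups
  set filled := (PySem.List.sorted ks seasonRank).foldl pvMStep groups with hfilled
  have hk1 : phase1.keys = PySem.Set.ofList (ks.map yearName) := by
    rw [hphase1, keys_mstep_foldl, PySem.Dict.keys_empty, set_update_nil]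
  have hk0 : groups.keys = PySem.Set.ofList (ks.map yearName) := by
    have h := PySem.Dict.keys_foldl_insert_key ks yearName
      (fun _ _ => ([] : List String)) PySem.Dict.empty
    rw [PySem.Dict.keys_empty, set_update_nil] at h
    exact h
  have hkF : filled.keys = groups.keys := by
    rw [hfilled, keys_mstep_foldl, hk0, set_update_of_subset]
    intro x hx
    obtain ⟨k, hk, rfl⟩ := List.mem_map.mp hx
    exact (PySem.Set.mem_ofList _ _).mpr
      (List.mem_map_of_mem ((PySem.List.mem_sorted ks seasonRank false k).mp hk))
  have hnd1 : phase1.keys.Nodup := hk1 ▸ PySem.Set.nodup_ofList _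
  have hnd0 : groups.keys.Nodup := hk0 ▸ PySem.Set.nodup_ofList _
  have hndF : filled.keys.Nodup := hkF ▸ hnd0
  have hget1 : ∀ c, phase1.getD c [] = ks.filter (fun k => yearName k == c) := by
    intro c
    rw [hphase1, getD_mstep_foldl, PySem.Dict.getD_empty, List.nil_append]
  have hget0 : ∀ c, groups.getD c [] = [] := by
    intro c
    rw [hgroups]
    exact getD_insert_nil_foldl ks PySem.Dict.empty
      (fun c' => PySem.Dict.getD_empty c' []) c
  have hgetF : ∀ c, filled.getD c []
      = PySem.List.sorted (ks.filter (fun k => yearName k == c)) seasonRank := by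
    intro c
    rw [hfilled, getD_mstep_foldl, hget0 c, List.nil_append, filter_sorted]
  rw [items_eq_keys_map phase1 [] hnd1, items_eq_keys_map filled [] hndF, List.map_map,
    hk1, hkF, hk0]
  apply List.map_congr_left
  intro c _
  simp only [Function.comp_def]
  rw [hget1 c, hgetF c]
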